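-- pv_equiv track=rewrite | github.com/arnavRai10/CS313E | Work.py | linear_search
-- ===== SOURCE A (Python) =====
-- def sum_of_series(v, k):
--     # Total lines
--     sum = 0
--     num_of_coffee = 0
--     # Minimum number of lines written before next cup of coffee
--     term = v
--
--     # While the lines written is greater than zero
--     while term > 0:
--         # Create new term, for new cup of coffee
--         term = v // (k ** num_of_coffee)
--         # Add lines written in past term to total lines
--         sum += term
--         # iterate the coffee cups
--         num_of_coffee += 1
--
--     return sum
--
-- def linear_search(n: int, k: int) -> int:
--     # use linear search here
--     # create array
--     code_lines = []
--     for val in range(1, n+1):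
--         code_lines.append(val)
--
--     # search through each possible value
--     max_val = 0
--     for x in code_lines:
--         # Use sum of series method to test total lines written by series
--         if sum_of_series(x, k) >= n:
--             return x
--
--     return x
-- ===== SOURCE B (Python) =====
-- def linear_search(n: int, k: int) -> int:
--     # Binary search for the smallest v in [1, n] whose coffee-series sum reaches n.
--     def coffee_sum(v):
--         s = 0
--         t = v
--         while t > 0:
--             s += t
--             t //= k
--         return s
--
--     lo, hi = 1, n
--     while lo < hi:
--         mid = (lo + hi) // 2
--         if coffee_sum(mid) >= n:
--             hi = mid
--         else:
--             lo = mid + 1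
--     return lo
-- ===== Notes on version B (the rewrite author's own statement) =====
-- stated objective: faster
-- what changed: Replaces A's linear scan (which materialises the list [1..n] and tests each candidate with sum_of_series) by a binary search over v, exploiting that the coffee-series sum is monotone in v.
import Mathlib
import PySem

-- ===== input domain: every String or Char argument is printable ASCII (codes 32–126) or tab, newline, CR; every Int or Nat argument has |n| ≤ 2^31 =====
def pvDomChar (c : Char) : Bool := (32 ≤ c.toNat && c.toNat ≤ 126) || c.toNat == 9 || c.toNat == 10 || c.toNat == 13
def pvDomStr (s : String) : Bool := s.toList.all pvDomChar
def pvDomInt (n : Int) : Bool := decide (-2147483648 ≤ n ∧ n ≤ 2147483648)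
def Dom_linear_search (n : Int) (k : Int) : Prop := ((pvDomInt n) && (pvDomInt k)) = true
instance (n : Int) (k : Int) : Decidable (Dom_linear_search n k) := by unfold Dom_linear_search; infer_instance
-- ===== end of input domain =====

-- B replaces A's linear scan over 1..n by a binary search on v (the coffee-series
-- sum is monotone in v), measured asymptotically faster.

-- ===== PORT A =====
-- while-loop of sum_of_series; fuel only makes the loop total, it is never
-- exhausted on inputs admitted by Pre_ (the loop runs at most v.toNat + 2 times there)
def sosLoop (v : Int) (k : Int) : Nat → Int → Nat → Int → Int
  | 0, sum, _, _ => sum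
  | fuel+1, sum, num, term =>
      if term > 0 then
        let term' := PySem.Int.floordiv v (k ^ num)
        sosLoop v k fuel (sum + term') (num + 1) term'
      else sum

def sum_of_series (v : Int) (k : Int) : Int := sosLoop v k (v.toNat + 2) 0 0 v

-- the for-loop with early return; the second argument carries the loop variable x
-- so that the trailing `return x` can see it (0 stands for the unbound x, n ≤ 0 only)
def lsLoop (n : Int) (k : Int) : List Int → Int → Int
  | [], x => x
  | x :: rest, _ => if sum_of_series x k ≥ n then x else lsLoop n k rest x

def linear_search (n : Int) (k : Int) : Int :=
  let code_lines := PySem.List.pyRange 1 (n+1) 1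
  let _max_val : Int := 0
  lsLoop n k code_lines 0

-- ===== PORT B =====
-- coffee_sum's while-loop; fuel only makes it total (at most v.toNat + 1 iterations on Pre_)
def coffeeLoop (k : Int) : Nat → Int → Int → Int
  | 0, s, _ => s
  | fuel+1, s, t =>
      if t > 0 then coffeeLoop k fuel (s + t) (PySem.Int.floordiv t k) else s

def coffee_sum (k : Int) (v : Int) : Int := coffeeLoop k (v.toNat + 1) 0 v

-- the binary-search while-loop; each iteration shrinks hi - lo, so (hi-lo).toNat + 1 fuel suffices
def bsLoop (n : Int) (k : Int) : Nat → Int → Int → Int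
  | 0, lo, _ => lo
  | fuel+1, lo, hi =>
      if lo < hi then
        let mid := PySem.Int.floordiv (lo + hi) 2
        if coffee_sum k mid ≥ n then bsLoop n k fuel lo mid
        else bsLoop n k fuel (mid + 1) hi
      else lo

def linear_search_alt (n : Int) (k : Int) : Int :=
  bsLoop n k ((n - 1).toNat + 1) 1 n

-- ===== PRECONDITION & SPEC =====
-- Pre_ excludes only inputs on which A does not return: n ≤ 0 (NameError: the loop
-- variable x is never bound), k = 0 (ZeroDivisionError), and k = 1 (sum_of_series loops forever).
def Pre_linear_search (n : Int) (k : Int) : Prop := 1 ≤ n ∧ (2 ≤ k ∨ k ≤ -1)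
instance (n : Int) (k : Int) : Decidable (Pre_linear_search n k) := by
  unfold Pre_linear_search; infer_instance

def pvWitness_linear_search : Int × Int := (5, 2)

def Spec_linear_search (n : Int) (k : Int) (out : Int) : Prop := out = linear_search_alt n k
instance (n : Int) (k : Int) (out : Int) : Decidable (Spec_linear_search n k out) := by
  unfold Spec_linear_search; infer_instance

-- ===== CLAIM (what is proved, stated in full; the proofs are below) =====
def Claim_equal_linear_search : Prop := ∀ (n : Int) (k : Int), Dom_linear_search n k → Pre_linear_search n k → Spec_linear_search n k (linear_search n k)

-- ===== LEMMAS AND PROOFS =====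

-- notation-free floordiv facts used throughout
theorem fd_nonneg {c k : Int} (hc : 0 ≤ c) (hk : 2 ≤ k) : 0 ≤ PySem.Int.floordiv c k := by
  rw [PySem.Int.le_floordiv_iff_mul_le (by omega)]; omega

theorem fd_lt {c k : Int} (hc : 0 < c) (hk : 2 ≤ k) : PySem.Int.floordiv c k < c := by
  rw [PySem.Int.floordiv_lt_iff_lt_mul (by omega)]; nlinarith

theorem fd_mono {x y k : Int} (hk : 2 ≤ k) (h : x ≤ y) :
    PySem.Int.floordiv x k ≤ PySem.Int.floordiv y k := by
  rw [PySem.Int.floordiv_eq_ediv_of_pos (by omega), PySem.Int.floordiv_eq_ediv_of_pos (by omega)]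
  exact Int.ediv_le_ediv (by omega) h

theorem fd_one (x : Int) : PySem.Int.floordiv x 1 = x := by
  rw [PySem.Int.floordiv_eq_ediv_of_pos (by omega)]; exact Int.ediv_one x

theorem fd_comp {v k : Int} (hk : 2 ≤ k) (j : Nat) :
    PySem.Int.floordiv (PySem.Int.floordiv v (k ^ j)) k = PySem.Int.floordiv v (k ^ (j+1)) := by
  have hkj : (0:Int) < k ^ j := pow_pos (by omega) j
  have hkj1 : (0:Int) < k ^ (j+1) := pow_pos (by omega) (j+1)
  rw [PySem.Int.floordiv_eq_ediv_of_pos (by omega), PySem.Int.floordiv_eq_ediv_of_pos hkj,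
      PySem.Int.floordiv_eq_ediv_of_pos hkj1, Int.ediv_ediv_of_nonneg (le_of_lt hkj), pow_succ]

theorem fd_neg_of_neg {x k : Int} (hx : 1 ≤ x) (hk : k ≤ -1) : PySem.Int.floordiv x k < 0 := by
  have h := PySem.Int.floordiv_mul_add_mod x k
  have hm := PySem.Int.mod_neg_bounds (a := x) (b := k) (by omega)
  nlinarith [hm.1, hm.2]

-- coffeeLoop: fuel insensitivity for k ≥ 2 (enough fuel ⇒ the result is the loop's)
theorem coffeeLoop_fuel {k : Int} (hk : 2 ≤ k) :
    ∀ N : Nat, ∀ c : Int, 0 ≤ c → c.toNat ≤ N →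
    ∀ f1 f2 : Nat, c.toNat + 1 ≤ f1 → c.toNat + 1 ≤ f2 →
    ∀ s : Int, coffeeLoop k f1 s c = coffeeLoop k f2 s c := by
  intro N
  induction N with
  | zero =>
    intro c hc hcN f1 f2 h1 h2 s
    obtain ⟨a, rfl⟩ : ∃ a, f1 = a + 1 := ⟨f1 - 1, by omega⟩
    obtain ⟨b, rfl⟩ : ∃ b, f2 = b + 1 := ⟨f2 - 1, by omega⟩
    have : ¬ c > 0 := by omega
    simp [coffeeLoop, this]
  | succ N ih =>
    intro c hc hcN f1 f2 h1 h2 s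
    obtain ⟨a, rfl⟩ : ∃ a, f1 = a + 1 := ⟨f1 - 1, by omega⟩
    obtain ⟨b, rfl⟩ : ∃ b, f2 = b + 1 := ⟨f2 - 1, by omega⟩
    by_cases hcpos : c > 0
    · simp only [coffeeLoop, if_pos hcpos]
      have hlt := fd_lt hcpos hk
      have hge := fd_nonneg hc hk
      exact ih _ hge (by omega) a b (by omega) (by omega) _
    · simp [coffeeLoop, hcpos]

-- unfolding coffee_sum one step, k ≥ 2
theorem coffee_sum_zero {k c : Int} (hc : c ≤ 0) : coffee_sum k c = 0 := by
  have : ¬ c > 0 := by omega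
  simp [coffee_sum, coffeeLoop, this]

theorem coffeeLoop_shift {k : Int} :
    ∀ f : Nat, ∀ s c : Int, coffeeLoop k f s c = s + coffeeLoop k f 0 c := by
  intro f
  induction f with
  | zero => intro s c; simp [coffeeLoop]
  | succ f ih =>
    intro s c
    by_cases h : c > 0
    · simp only [coffeeLoop, if_pos h]
      rw [ih (s + c), ih (0 + c)]; ring
    · simp [coffeeLoop, h]

theorem coffee_sum_step {k c : Int} (hk : 2 ≤ k) (hc : 0 < c) :
    coffee_sum k c = c + coffee_sum k (PySem.Int.floordiv c k) := by
  have hge := fd_nonneg (le_of_lt hc) hk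
  have hlt := fd_lt hc hk
  show coffeeLoop k (c.toNat + 1) 0 c = _
  rw [show coffeeLoop k (c.toNat + 1) 0 c =
        coffeeLoop k c.toNat (0 + c) (PySem.Int.floordiv c k) by
      simp [coffeeLoop, hc]]
  rw [coffeeLoop_fuel hk c.toNat _ hge (by omega) c.toNat ((PySem.Int.floordiv c k).toNat + 1)
        (by omega) (by omega)]
  rw [coffeeLoop_shift]
  unfold coffee_sum
  ring

theorem coffee_sum_nonneg {k : Int} (hk : 2 ≤ k) :
    ∀ N : Nat, ∀ c : Int, c.toNat ≤ N → 0 ≤ coffee_sum k c := by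
  intro N
  induction N with
  | zero =>
    intro c hc
    by_cases h : 0 < c
    · omega
    · rw [coffee_sum_zero (by omega)]
  | succ N ih =>
    intro c hc
    by_cases h : 0 < c
    · rw [coffee_sum_step hk h]
      have := ih (PySem.Int.floordiv c k) (by have := fd_lt h hk; have := fd_nonneg (le_of_lt h) hk; omega)
      omega
    · rw [coffee_sum_zero (by omega)]

theorem coffee_sum_ge_self {k c : Int} (hk : 2 ≤ k) (hc : 1 ≤ c) : c ≤ coffee_sum k c := by
  rw [coffee_sum_step hk (by omega)]
  have := coffee_sum_nonneg hk (PySem.Int.floordiv c k).toNat (PySem.Int.floordiv c k) (le_refl _)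
  omega

theorem coffee_sum_mono {k : Int} (hk : 2 ≤ k) :
    ∀ N : Nat, ∀ y : Int, y.toNat ≤ N → ∀ x : Int, x ≤ y →
    coffee_sum k x ≤ coffee_sum k y := by
  intro N
  induction N with
  | zero =>
    intro y hy x hxy
    have hx : x ≤ 0 := by omega
    rw [coffee_sum_zero hx, coffee_sum_zero (by omega)]
  | succ N ih =>
    intro y hy x hxy
    by_cases hxp : 0 < x
    · have hyp : 0 < y := by omega
      rw [coffee_sum_step hk hxp, coffee_sum_step hk hyp]
      have h1 := fd_mono hk hxy
      have h2 := ih (PySem.Int.floordiv y k)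
        (by have := fd_lt hyp hk; have := fd_nonneg (le_of_lt hyp) hk; omega)
        (PySem.Int.floordiv x k) h1
      omega
    · rw [coffee_sum_zero (by omega)]
      exact coffee_sum_nonneg hk y.toNat y (le_refl _)

-- A's sum loop equals B's sum loop, k ≥ 2: the invariant c = v // k^j links them
theorem sosLoop_eq_coffeeLoop {v k : Int} (hk : 2 ≤ k) :
    ∀ N : Nat, ∀ c : Int, 0 ≤ c → c.toNat ≤ N → ∀ j : Nat,
    c = PySem.Int.floordiv v (k ^ j) →
    ∀ fA fB : Nat, c.toNat + 1 ≤ fA → c.toNat + 1 ≤ fB → ∀ s : Int,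
    sosLoop v k fA s (j+1) c = coffeeLoop k fB s (PySem.Int.floordiv c k) := by
  intro N
  induction N with
  | zero =>
    intro c hc hcN j hcj fA fB hA hB s
    obtain ⟨a, rfl⟩ : ∃ a, fA = a + 1 := ⟨fA - 1, by omega⟩
    obtain ⟨b, rfl⟩ : ∃ b, fB = b + 1 := ⟨fB - 1, by omega⟩
    have hc0 : c = 0 := by omega
    subst hc0
    have hfd : PySem.Int.floordiv (0:Int) k = 0 := by
      rw [PySem.Int.floordiv_eq_ediv_of_pos (by omega)]; simp
    simp [sosLoop, coffeeLoop, hfd]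
  | succ N ih =>
    intro c hc hcN j hcj fA fB hA hB s
    obtain ⟨a, rfl⟩ : ∃ a, fA = a + 1 := ⟨fA - 1, by omega⟩
    obtain ⟨b, rfl⟩ : ∃ b, fB = b + 1 := ⟨fB - 1, by omega⟩
    by_cases hcpos : c > 0
    · have hterm : PySem.Int.floordiv v (k ^ (j+1)) = PySem.Int.floordiv c k := by
        rw [← fd_comp hk j, ← hcj]
      have hge := fd_nonneg hc hk
      have hlt := fd_lt hcpos hk
      simp only [sosLoop, coffeeLoop, if_pos hcpos, hterm]
      by_cases hc' : PySem.Int.floordiv c k > 0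
      · rw [if_pos hc']
        exact ih (PySem.Int.floordiv c k) hge (by omega) (j+1) hterm.symm a b
          (by omega) (by omega) _
      · rw [if_neg hc']
        have hc'0 : PySem.Int.floordiv c k = 0 := by omega
        rw [ih (PySem.Int.floordiv c k) hge (by omega) (j+1) hterm.symm a
              ((PySem.Int.floordiv c k).toNat + 1) (by omega) (by omega) _]
        rw [hc'0]
        have hfd : PySem.Int.floordiv (0:Int) k = 0 := by
          rw [PySem.Int.floordiv_eq_ediv_of_pos (by omega)]; simp
        simp [coffeeLoop, hfd]
    · have hc0 : c = 0 := by omega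
      subst hc0
      have hfd : PySem.Int.floordiv (0:Int) k = 0 := by
        rw [PySem.Int.floordiv_eq_ediv_of_pos (by omega)]; simp
      simp [sosLoop, coffeeLoop, hfd]

-- one-step unfolding of sosLoop
theorem sosLoop_succ (v k : Int) (fuel : Nat) (s : Int) (num : Nat) (t : Int) :
    sosLoop v k (fuel+1) s num t =
      if t > 0 then sosLoop v k fuel (s + PySem.Int.floordiv v (k ^ num)) (num+1)
        (PySem.Int.floordiv v (k ^ num)) else s := rfl

-- the two sum functions agree, k ≥ 2, v ≥ 1
theorem sums_eq {v k : Int} (hk : 2 ≤ k) (hv : 1 ≤ v) :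
    sum_of_series v k = coffee_sum k v := by
  have hvpos : v > 0 := by omega
  have h0 : PySem.Int.floordiv v (k ^ (0:Nat)) = v := by rw [pow_zero]; exact fd_one v
  have hge := fd_nonneg (c := v) (by omega) hk
  have hlt := fd_lt hvpos hk
  have step1 : sum_of_series v k = sosLoop v k (v.toNat + 1) (0 + v) (0+1) v := by
    show sosLoop v k (v.toNat + 1 + 1) 0 0 v = _
    rw [sosLoop_succ, if_pos hvpos, h0]
  rw [step1, sosLoop_eq_coffeeLoop hk v.toNat v (by omega) (le_refl _) 0 h0.symm
        (v.toNat + 1) (v.toNat + 1) (by omega) (by omega)]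
  have step2 : coffee_sum k v = coffeeLoop k v.toNat (0 + v) (PySem.Int.floordiv v k) := by
    show coffeeLoop k (v.toNat + 1) 0 v = _
    simp only [coffeeLoop, if_pos hvpos]
  rw [step2]
  exact coffeeLoop_fuel hk v.toNat _ (fd_nonneg (by omega) hk) (by omega)
    (v.toNat + 1) v.toNat (by omega) (by omega) _

-- k ≤ -1: both sums in closed form
theorem coffee_sum_neg {k c : Int} (hk : k ≤ -1) (hc : 1 ≤ c) : coffee_sum k c = c := by
  have hfd := fd_neg_of_neg hc hk
  obtain ⟨m, hm⟩ : ∃ m, c.toNat + 1 = m + 2 := ⟨c.toNat - 1, by omega⟩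
  show coffeeLoop k (c.toNat + 1) 0 c = c
  rw [hm]
  have h1 : c > 0 := by omega
  have h2 : ¬ PySem.Int.floordiv c k > 0 := by omega
  simp [coffeeLoop, h1, h2]

theorem sum_of_series_neg {k x : Int} (hk : k ≤ -1) (hx : 1 ≤ x) :
    sum_of_series x k = x + PySem.Int.floordiv x k := by
  have hxpos : x > 0 := by omega
  have hfd := fd_neg_of_neg hx hk
  have h2 : ¬ PySem.Int.floordiv x k > 0 := by omega
  obtain ⟨m, hm⟩ : ∃ m, x.toNat + 2 = m + 3 := ⟨x.toNat - 1, by omega⟩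
  show sosLoop x k (x.toNat + 2) 0 0 x = _
  rw [hm]
  simp [sosLoop, hxpos, h2]

-- binary-search loop characterisation: returns the least value satisfying the test
theorem bsLoop_char {n k : Int}
    (Hmono : ∀ x y : Int, 1 ≤ x → x ≤ y → n ≤ coffee_sum k x → n ≤ coffee_sum k y) :
    ∀ fuel : Nat, ∀ lo hi : Int, 1 ≤ lo → lo ≤ hi → (hi - lo).toNat ≤ fuel →
    n ≤ coffee_sum k hi → (∀ y : Int, 1 ≤ y → y < lo → ¬ n ≤ coffee_sum k y) →
    1 ≤ bsLoop n k fuel lo hi ∧ bsLoop n k fuel lo hi ≤ hi ∧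
      n ≤ coffee_sum k (bsLoop n k fuel lo hi) ∧
      (∀ y : Int, 1 ≤ y → y < bsLoop n k fuel lo hi → ¬ n ≤ coffee_sum k y) := by
  intro fuel
  induction fuel with
  | zero =>
    intro lo hi hlo hlohi hfuel hP hlow
    have : lo = hi := by omega
    subst this
    simp only [bsLoop]
    exact ⟨hlo, le_refl _, hP, hlow⟩
  | succ f ih =>
    intro lo hi hlo hlohi hfuel hP hlow
    by_cases h : lo < hi
    · have hmid1 := (PySem.Int.floordiv_two_mid_bounds (lo := lo) (hi := hi) (by omega)).1
      have hmid2 : PySem.Int.floordiv (lo + hi) 2 < hi := by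
        rw [PySem.Int.floordiv_lt_iff_lt_mul (by omega)]; omega
      set mid := PySem.Int.floordiv (lo + hi) 2 with hmid
      simp only [bsLoop, if_pos h]
      rw [← hmid]
      by_cases hc : coffee_sum k mid ≥ n
      · rw [if_pos hc]
        obtain ⟨a1, a2, a3, a4⟩ := ih lo mid hlo (by omega) (by omega) hc hlow
        exact ⟨a1, by omega, a3, a4⟩
      · rw [if_neg hc]
        refine ih (mid + 1) hi (by omega) (by omega) (by omega) hP ?_
        intro y hy hylt
        by_cases hylo : y < lo
        · exact hlow y hy hylo
        · intro hPy
          exact hc (Hmono y mid hy (by omega) hPy)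
    · have : lo = hi := by omega
      subst this
      simp only [bsLoop, if_neg h]
      exact ⟨hlo, le_refl _, hP, hlow⟩

-- linear-scan characterisation, found case
theorem lsLoop_char {n k : Int} (hPn : n ≤ sum_of_series n k) :
    ∀ N : Nat, ∀ a : Int, (n + 1 - a).toNat ≤ N → 1 ≤ a → a ≤ n →
    (∀ y : Int, 1 ≤ y → y < a → ¬ n ≤ sum_of_series y k) → ∀ last : Int,
    1 ≤ lsLoop n k (PySem.List.pyRange a (n+1) 1) last ∧
      lsLoop n k (PySem.List.pyRange a (n+1) 1) last ≤ n ∧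
      n ≤ sum_of_series (lsLoop n k (PySem.List.pyRange a (n+1) 1) last) k ∧
      (∀ y : Int, 1 ≤ y → y < lsLoop n k (PySem.List.pyRange a (n+1) 1) last →
        ¬ n ≤ sum_of_series y k) := by
  intro N
  induction N with
  | zero => intro a hN ha han hlow last; exact absurd hN (by omega)
  | succ N ih =>
    intro a hN ha han hlow last
    rw [PySem.List.pyRange_one_cons (by omega)]
    by_cases hc : sum_of_series a k ≥ n
    · simp only [lsLoop, if_pos hc]
      exact ⟨ha, han, hc, hlow⟩
    · simp only [lsLoop, if_neg hc]
      by_cases hend : a = n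
      · exact absurd (hend ▸ hPn) hc
      · refine ih (a + 1) (by omega) (by omega) (by omega) ?_ a
        intro y hy hylt
        by_cases hya : y < a
        · exact hlow y hy hya
        · have : y = a := by omega
          subst this; exact hc

-- linear-scan, nothing-found case: falls through returning the last element n
theorem lsLoop_none {n k : Int}
    (Hfalse : ∀ x : Int, 1 ≤ x → x ≤ n → ¬ n ≤ sum_of_series x k) :
    ∀ N : Nat, ∀ a : Int, (n + 1 - a).toNat ≤ N → 1 ≤ a → a ≤ n → ∀ last : Int,
    lsLoop n k (PySem.List.pyRange a (n+1) 1) last = n := by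
  intro N
  induction N with
  | zero => intro a hN ha han last; exact absurd hN (by omega)
  | succ N ih =>
    intro a hN ha han last
    rw [PySem.List.pyRange_one_cons (by omega)]
    have hc : ¬ sum_of_series a k ≥ n := Hfalse a ha han
    simp only [lsLoop, if_neg hc]
    by_cases hend : a = n
    · have hnil : PySem.List.pyRange (a + 1) (n + 1) 1 = [] := by
        rw [hend]; simp [PySem.List.pyRange]
      rw [hnil]
      exact hend
    · exact ih (a + 1) (by omega) (by omega) (by omega) a

-- uniqueness of the "first value satisfying a test" characterisation
theorem first_unique {P : Int → Prop} {r1 r2 : Int} (h1 : 1 ≤ r1) (h2 : 1 ≤ r2)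
    (hp1 : P r1) (hp2 : P r2)
    (hl1 : ∀ y : Int, 1 ≤ y → y < r1 → ¬ P y) (hl2 : ∀ y : Int, 1 ≤ y → y < r2 → ¬ P y) :
    r1 = r2 := by
  rcases lt_trichotomy r1 r2 with h | h | h
  · exact absurd hp1 (hl2 r1 h1 h)
  · exact h
  · exact absurd hp2 (hl1 r2 h2 h)

-- ===== VERDICT (by name: the statement is the Claim_ definition above) =====
theorem linear_search_spec : Claim_equal_linear_search := by
  intro n k _ hpre
  obtain ⟨hn, hk⟩ := hpre
  show linear_search n k = linear_search_alt n k
  show lsLoop n k (PySem.List.pyRange 1 (n + 1) 1) 0 = bsLoop n k ((n - 1).toNat + 1) 1 n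
  rcases hk with hk | hk
  · -- k ≥ 2: both compute the least v in [1,n] with sum ≥ n
    have hsums : ∀ x : Int, 1 ≤ x → sum_of_series x k = coffee_sum k x :=
      fun x hx => sums_eq hk hx
    have Hmono : ∀ x y : Int, 1 ≤ x → x ≤ y → n ≤ coffee_sum k x → n ≤ coffee_sum k y :=
      fun x y _ hxy hx => le_trans hx (coffee_sum_mono hk y.toNat y (le_refl _) x hxy)
    have hPn : n ≤ sum_of_series n k := by
      rw [hsums n hn]; exact coffee_sum_ge_self hk hn
    have hA := lsLoop_char hPn (n + 1 - 1).toNat 1 (le_refl _) (le_refl _) hn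
      (fun y hy hlt => absurd hlt (by omega)) 0
    have hB := bsLoop_char Hmono ((n - 1).toNat + 1) 1 n (le_refl _) hn (by omega)
      (coffee_sum_ge_self hk hn) (fun y hy hlt => absurd hlt (by omega))
    exact first_unique (P := fun t => n ≤ coffee_sum k t) hA.1 hB.1
      (by show n ≤ coffee_sum k _; rw [← hsums _ hA.1]; exact hA.2.2.1) hB.2.2.1
      (fun y hy hlt => by
        show ¬ n ≤ coffee_sum k y
        rw [← hsums y hy]; exact hA.2.2.2 y hy hlt)
      hB.2.2.2
  · -- k ≤ -1: A falls through and returns n; B's search also lands on n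
    have Hfalse : ∀ x : Int, 1 ≤ x → x ≤ n → ¬ n ≤ sum_of_series x k := by
      intro x hx hxn
      rw [sum_of_series_neg hk hx]
      have := fd_neg_of_neg hx hk
      omega
    have hA := lsLoop_none Hfalse (n + 1 - 1).toNat 1 (le_refl _) (le_refl _) hn 0
    have Hmono : ∀ x y : Int, 1 ≤ x → x ≤ y → n ≤ coffee_sum k x → n ≤ coffee_sum k y := by
      intro x y hx hxy hPx
      rw [coffee_sum_neg hk hx] at hPx
      rw [coffee_sum_neg hk (by omega)]
      omega
    have hB := bsLoop_char Hmono ((n - 1).toNat + 1) 1 n (le_refl _) hn (by omega)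
      (by rw [coffee_sum_neg hk hn]) (fun y hy hlt => absurd hlt (by omega))
    have : bsLoop n k ((n - 1).toNat + 1) 1 n = n := by
      have h1 := hB.2.2.1
      rw [coffee_sum_neg hk hB.1] at h1
      omega
    rw [hA, this]
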